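-- pv_equiv track=rewrite | github.com/anwardhan/lunarAPI | app/core/config.py | normalize_database_url
-- ===== SOURCE A (Python) =====
-- def normalize_database_url(value: str) -> str:
--     database_url = value.strip().strip("\"'")
--     if not database_url:
--         raise ValueError("DATABASE_URL is empty.")
--     if database_url.startswith("${") or database_url.startswith("$("):
--         raise ValueError(
--             "DATABASE_URL is unresolved. In DigitalOcean App Platform, bind it to the "
--             "database component value such as ${postgres-db.DATABASE_URL}."
--         )
--
--     replacements = {
--         "postgres://": "postgresql+asyncpg://",
--         "postgresql://": "postgresql+asyncpg://",
--         "postgresql+psycopg://": "postgresql+asyncpg://",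
--         "postgresql+psycopg2://": "postgresql+asyncpg://",
--     }
--     for prefix, replacement in replacements.items():
--         if database_url.startswith(prefix):
--             return replacement + database_url[len(prefix):]
--     return database_url
-- ===== SOURCE B (Python) =====
-- _PREFIXES = ("postgres://", "postgresql://", "postgresql+psycopg://", "postgresql+psycopg2://")
--
--
-- def _build_trie(prefixes):
--     trie = {}
--     accept = set()
--     n = 0
--     for p in prefixes:
--         s = 0
--         for ch in p:
--             nxt = trie.get((s, ch))
--             if nxt is None:
--                 n += 1
--                 trie[(s, ch)] = n
--                 nxt = n
--             s = nxt
--         accept.add(s)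
--     return trie, accept
--
--
-- _TRIE, _ACCEPT = _build_trie(_PREFIXES)
--
--
-- def normalize_database_url(value: str) -> str:
--     url = value.strip().strip("\"'")
--     if not url:
--         raise ValueError("DATABASE_URL is empty.")
--     if url.startswith("${") or url.startswith("$("):
--         raise ValueError(
--             "DATABASE_URL is unresolved. In DigitalOcean App Platform, bind it to the "
--             "database component value such as ${postgres-db.DATABASE_URL}."
--         )
--     state = 0
--     rest = url
--     while rest:
--         nxt = _TRIE.get((state, rest[0]))
--         if nxt is None:
--             return url
--         state = nxt
--         rest = rest[1:]
--         if state in _ACCEPT: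
--             return "postgresql+asyncpg://" + rest
--     return url
-- ===== Notes on version B (the rewrite author's own statement) =====
-- stated objective: alternative
-- what changed: Instead of scanning the URL against four full prefix literals one after another, B builds a trie (a DFA transition table) from the four scheme prefixes once at module load and walks the URL character by character through it, rewriting the scheme when an accepting state is reached.
-- outside the precondition, e.g. on normalize_database_url('${'): A raises ValueError, B raises ValueError; on normalize_database_url('$('): A raises ValueError, B raises ValueError; on normalize_database_url(''): A raises ValueError, B raises ValueError
import Mathlib
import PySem

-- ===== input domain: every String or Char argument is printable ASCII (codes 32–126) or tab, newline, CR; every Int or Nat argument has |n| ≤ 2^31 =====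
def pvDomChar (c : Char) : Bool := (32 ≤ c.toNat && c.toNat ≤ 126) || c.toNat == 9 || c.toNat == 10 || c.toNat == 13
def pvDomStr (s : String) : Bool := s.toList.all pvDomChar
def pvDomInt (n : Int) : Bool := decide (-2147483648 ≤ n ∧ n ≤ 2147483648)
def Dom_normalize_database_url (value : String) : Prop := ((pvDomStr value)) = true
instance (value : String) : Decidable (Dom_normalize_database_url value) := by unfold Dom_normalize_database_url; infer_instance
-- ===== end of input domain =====

set_option maxRecDepth 100000
set_option maxHeartbeats 2000000

-- B replaces A's sequential scan over four full prefix literals by a trie/DFA built once from the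
-- four scheme prefixes and walked character by character over the URL (objective: alternative).

-- ===== PORT A =====
def pvRepls : List (List Char × List Char) :=
  [("postgres://".toList, "postgresql+asyncpg://".toList),
   ("postgresql://".toList, "postgresql+asyncpg://".toList),
   ("postgresql+psycopg://".toList, "postgresql+asyncpg://".toList),
   ("postgresql+psycopg2://".toList, "postgresql+asyncpg://".toList)]

-- the 'for prefix, replacement in replacements.items():' loop of A
def pvLoopA : List (List Char × List Char) → List Char → List Char
  | [], u => u
  | (p, r) :: rest, u =>
    if PySem.Chars.startswith u p then r ++ PySem.List.slice u (some (p.length : Int)) none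
    else pvLoopA rest u

def pvStripped (value : String) : List Char :=
  PySem.Chars.stripChars (PySem.Chars.strip value.toList) ['"', '\'']

-- A raises ValueError on empty / '${' / '$(' stripped values; those inputs are outside Pre_.
def normalize_database_url (value : String) : String :=
  String.ofList (pvLoopA pvRepls (pvStripped value))

-- ===== PORT B =====
def pvPrefixes : List (List Char) :=
  ["postgres://".toList, "postgresql://".toList,
   "postgresql+psycopg://".toList, "postgresql+psycopg2://".toList]

-- inner 'for ch in p' loop of _build_trie: state ((trie, n), s)
def pvBuildOne (tn : PySem.Dict (Int × Char) Int × Int) (p : List Char) :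
    (PySem.Dict (Int × Char) Int × Int) × Int :=
  p.foldl (fun st ch =>
    match PySem.Dict.get? st.1.1 (st.2, ch) with
    | some nxt => (st.1, nxt)
    | none => ((PySem.Dict.insert st.1.1 (st.2, ch) (st.1.2 + 1), st.1.2 + 1), st.1.2 + 1))
    (tn, 0)

def pvBuildTrie : (PySem.Dict (Int × Char) Int × Int) × PySem.Set Int :=
  pvPrefixes.foldl (fun st p =>
    let r := pvBuildOne st.1 p
    (r.1, PySem.Set.add st.2 r.2))
    ((PySem.Dict.empty, 0), PySem.Set.empty)

def pvTrie : PySem.Dict (Int × Char) Int := pvBuildTrie.1.1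
def pvAccept : PySem.Set Int := pvBuildTrie.2

-- the 'while rest:' walk of B
def pvWalkB : Int → List Char → Option (List Char)
  | _, [] => none
  | s, c :: rest =>
    match PySem.Dict.get? pvTrie (s, c) with
    | none => none
    | some s' => if PySem.Set.contains pvAccept s' then some rest else pvWalkB s' rest

def normalize_database_url_alt (value : String) : String :=
  let u := pvStripped value
  match pvWalkB 0 u with
  | some rest => String.ofList ("postgresql+asyncpg://".toList ++ rest)
  | none => String.ofList u

-- ===== PRECONDITION & SPEC =====
-- Pre_ excludes exactly the inputs on which A raises ValueError: stripped value empty, or starting with "${" or "$(".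
def Pre_normalize_database_url (value : String) : Prop :=
  pvStripped value ≠ [] ∧
  PySem.Chars.startswith (pvStripped value) "${".toList = false ∧
  PySem.Chars.startswith (pvStripped value) "$(".toList = false
instance (value : String) : Decidable (Pre_normalize_database_url value) := by
  unfold Pre_normalize_database_url; infer_instance

def pvWitness_normalize_database_url : String := "postgres://user@host/db"

def Spec_normalize_database_url (value : String) (out : String) : Prop := out = normalize_database_url_alt value
instance (value : String) (out : String) : Decidable (Spec_normalize_database_url value out) := by unfold Spec_normalize_database_url; infer_instance

-- ===== CLAIM (what is proved, stated in full; the proofs are below) =====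
def Claim_equal_normalize_database_url : Prop := ∀ (value : String), Dom_normalize_database_url value → Pre_normalize_database_url value → Spec_normalize_database_url value (normalize_database_url value)

-- ===== LEMMAS AND PROOFS =====

-- the string spelled by each trie state (root 0 = "")
def pvPath : Int → List Char
  | 1 => "p".toList | 2 => "po".toList | 3 => "pos".toList | 4 => "post".toList
  | 5 => "postg".toList | 6 => "postgr".toList | 7 => "postgre".toList | 8 => "postgres".toList
  | 9 => "postgres:".toList | 10 => "postgres:/".toList | 11 => "postgres://".toList
  | 12 => "postgresq".toList | 13 => "postgresql".toList | 14 => "postgresql:".toList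
  | 15 => "postgresql:/".toList | 16 => "postgresql://".toList
  | 17 => "postgresql+".toList | 18 => "postgresql+p".toList | 19 => "postgresql+ps".toList
  | 20 => "postgresql+psy".toList | 21 => "postgresql+psyc".toList | 22 => "postgresql+psyco".toList
  | 23 => "postgresql+psycop".toList | 24 => "postgresql+psycopg".toList
  | 25 => "postgresql+psycopg:".toList | 26 => "postgresql+psycopg:/".toList
  | 27 => "postgresql+psycopg://".toList
  | 28 => "postgresql+psycopg2".toList | 29 => "postgresql+psycopg2:".toList
  | 30 => "postgresql+psycopg2:/".toList | 31 => "postgresql+psycopg2://".toList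
  | _ => []

lemma pv_items : pvTrie.items = ([((0,'p'),1), ((1,'o'),2), ((2,'s'),3), ((3,'t'),4), ((4,'g'),5), ((5,'r'),6), ((6,'e'),7), ((7,'s'),8), ((8,':'),9), ((9,'/'),10), ((10,'/'),11), ((8,'q'),12), ((12,'l'),13), ((13,':'),14), ((14,'/'),15), ((15,'/'),16), ((13,'+'),17), ((17,'p'),18), ((18,'s'),19), ((19,'y'),20), ((20,'c'),21), ((21,'o'),22), ((22,'p'),23), ((23,'g'),24), ((24,':'),25), ((25,'/'),26), ((26,'/'),27), ((24,'2'),28), ((28,':'),29), ((29,'/'),30), ((30,'/'),31)] : List ((Int × Char) × Int)) := by decide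

lemma pv_acc : pvAccept = ([11, 16, 27, 31] : List Int) := by decide

lemma pv_trans {s : Int} {c : Char} {s' : Int}
    (h : PySem.Dict.get? pvTrie (s, c) = some s') :
    pvPath s' = pvPath s ++ [c] ∧ (PySem.Set.contains pvAccept s' = true → pvPath s' ∈ pvPrefixes) := by
  have hm := PySem.Dict.mem_items_of_get?_eq_some pvTrie h
  rw [pv_items] at hm
  fin_cases hm <;> exact ⟨by decide, by rw [pv_acc]; decide⟩

lemma pv_walk_sound : ∀ (u : List Char) (s : Int) (w : List Char),
    pvWalkB s u = some w → ∃ v, u = v ++ w ∧ pvPath s ++ v ∈ pvPrefixes := by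
  intro u
  induction u with
  | nil => intro s w h; simp [pvWalkB] at h
  | cons c rest ih =>
    intro s w h
    cases hget : PySem.Dict.get? pvTrie (s, c) with
    | none => rw [pvWalkB, hget] at h; dsimp only at h; simp at h
    | some s' =>
      rw [pvWalkB, hget] at h
      dsimp only at h
      obtain ⟨hpath, hacc⟩ := pv_trans hget
      by_cases hA : PySem.Set.contains pvAccept s' = true
      · rw [if_pos hA] at h
        obtain rfl := Option.some.inj h
        exact ⟨[c], rfl, by rw [← hpath]; exact hacc hA⟩
      · rw [if_neg hA] at h
        obtain ⟨v, hv, hp⟩ := ih s' w h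
        refine ⟨c :: v, by rw [hv]; rfl, ?_⟩
        rw [show pvPath s ++ c :: v = pvPath s' ++ v by rw [hpath]; simp]
        exact hp

lemma pv_core (u : List Char) : String.ofList (pvLoopA pvRepls u) =
    (match pvWalkB 0 u with
     | some rest => String.ofList ("postgresql+asyncpg://".toList ++ rest)
     | none => String.ofList u) := by
  by_cases h1 : PySem.Chars.startswith u "postgres://".toList
  · obtain ⟨w, hw⟩ := (PySem.Chars.startswith_iff u _).mp h1
    subst hw
    rw [pvRepls, pvLoopA, if_pos h1]
    have hwalk : pvWalkB 0 ("postgres://".toList ++ w) = some w := rfl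
    rw [hwalk]
    have : PySem.List.slice ("postgres://".toList ++ w)
        (some (("postgres://".toList.length : Nat) : Int)) none = w := by
      rw [PySem.List.slice_from_natCast]; simp
    simp at this ⊢
    rw [this]
  · by_cases h2 : PySem.Chars.startswith u "postgresql://".toList
    · obtain ⟨w, hw⟩ := (PySem.Chars.startswith_iff u _).mp h2
      subst hw
      rw [pvRepls, pvLoopA, if_neg h1, pvLoopA, if_pos h2]
      have hwalk : pvWalkB 0 ("postgresql://".toList ++ w) = some w := rfl
      rw [hwalk]
      have : PySem.List.slice ("postgresql://".toList ++ w)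
          (some (("postgresql://".toList.length : Nat) : Int)) none = w := by
        rw [PySem.List.slice_from_natCast]; simp
      simp at this ⊢
      rw [this]
    · by_cases h3 : PySem.Chars.startswith u "postgresql+psycopg://".toList
      · obtain ⟨w, hw⟩ := (PySem.Chars.startswith_iff u _).mp h3
        subst hw
        rw [pvRepls, pvLoopA, if_neg h1, pvLoopA, if_neg h2, pvLoopA, if_pos h3]
        have hwalk : pvWalkB 0 ("postgresql+psycopg://".toList ++ w) = some w := rfl
        rw [hwalk]
        have : PySem.List.slice ("postgresql+psycopg://".toList ++ w)
            (some (("postgresql+psycopg://".toList.length : Nat) : Int)) none = w := by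
          rw [PySem.List.slice_from_natCast]; simp
        simp at this ⊢
        rw [this]
      · by_cases h4 : PySem.Chars.startswith u "postgresql+psycopg2://".toList
        · obtain ⟨w, hw⟩ := (PySem.Chars.startswith_iff u _).mp h4
          subst hw
          rw [pvRepls, pvLoopA, if_neg h1, pvLoopA, if_neg h2, pvLoopA, if_neg h3, pvLoopA, if_pos h4]
          have hwalk : pvWalkB 0 ("postgresql+psycopg2://".toList ++ w) = some w := rfl
          rw [hwalk]
          have : PySem.List.slice ("postgresql+psycopg2://".toList ++ w)
              (some (("postgresql+psycopg2://".toList.length : Nat) : Int)) none = w := by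
            rw [PySem.List.slice_from_natCast]; simp
          simp at this ⊢
          rw [this]
        · rw [pvRepls, pvLoopA, if_neg h1, pvLoopA, if_neg h2, pvLoopA, if_neg h3, pvLoopA, if_neg h4, pvLoopA]
          cases hwalk : pvWalkB 0 u with
          | none => rfl
          | some rest =>
            obtain ⟨v, hv, hp⟩ := pv_walk_sound u 0 rest hwalk
            rw [show pvPath 0 ++ v = v from by rfl] at hp
            simp only [pvPrefixes, List.mem_cons, List.not_mem_nil, or_false] at hp
            rcases hp with h | h | h | h
            · exact absurd ((PySem.Chars.startswith_iff u _).mpr ⟨rest, by rw [← h]; exact hv.symm⟩) h1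
            · exact absurd ((PySem.Chars.startswith_iff u _).mpr ⟨rest, by rw [← h]; exact hv.symm⟩) h2
            · exact absurd ((PySem.Chars.startswith_iff u _).mpr ⟨rest, by rw [← h]; exact hv.symm⟩) h3
            · exact absurd ((PySem.Chars.startswith_iff u _).mpr ⟨rest, by rw [← h]; exact hv.symm⟩) h4

-- ===== VERDICT (by name: the statement is the Claim_ definition above) =====
theorem normalize_database_url_spec : Claim_equal_normalize_database_url := by
  intro value _ _
  unfold Spec_normalize_database_url normalize_database_url normalize_database_url_alt
  exact pv_core (pvStripped value)
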